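-- pv_equiv track=rewrite | github.com/jmibarrap/HeyBot | bot.py | _clean_csv_data_string
-- ===== SOURCE A (Python) =====
-- def _clean_csv_data_string(csv_data):
--     """
--     Clean CSV data string.
--
--     Parameters:
--     - csv_data (str): CSV data as a string.
--
--     Returns:
--     - cleaned_data (list): Cleaned CSV data as a list of lists.
--     """
--     csv_data = csv_data.split("\n")
--     csv_data = csv_data[1:]
--     csv_data = list(filter(None, csv_data))
--     for index, line in enumerate(csv_data):
--         if line[-1].isdigit():
--             twitter_id = line.split(",")[-1].split(":")[1]
--             csv_data[index] =  ','.join(line.split(",")[:-1]+[twitter_id]) + "\n"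
--         else:
--             csv_data[index] = line + ","
--     csv_data = ''.join(csv_data)
--     csv_data = csv_data.split("\n")
--     csv_data = [line.split(",") for line in csv_data]
--     csv_data = [row for row in csv_data if len(row) > 1]
--     return csv_data
-- ===== SOURCE B (Python) =====
-- def _clean_csv_data_string(csv_data):
--     """One pass over the data lines, emitting each record as soon as its
--     id-bearing line arrives; earlier continuation lines accumulate as a
--     comma-terminated text prefix of the record."""
--     rows = []
--     prefix = ""
--     for line in filter(None, csv_data.split("\n")[1:]):
--         if line[-1].isdigit():
--             fields = line.split(",")
--             twitter_id = fields[-1].split(":")[1]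
--             rows.append((prefix + ",".join(fields[:-1] + [twitter_id])).split(","))
--             prefix = ""
--         else:
--             prefix += line + ","
--     rows.append(prefix.split(","))
--     return [row for row in rows if len(row) > 1]
-- ===== Notes on version B (the rewrite author's own statement) =====
-- stated objective: simpler
-- what changed: Replaced A's three-stage pipeline (rewrite each line, join everything into one string, re-split it by newline and comma) by a single pass over the lines that accumulates a record's continuation text and emits the record's row as soon as its id-bearing line arrives; Pre_ excludes only the inputs where both implementations raise IndexError (a kept line ending in a digit whose last comma field has no colon).
import Mathlib
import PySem

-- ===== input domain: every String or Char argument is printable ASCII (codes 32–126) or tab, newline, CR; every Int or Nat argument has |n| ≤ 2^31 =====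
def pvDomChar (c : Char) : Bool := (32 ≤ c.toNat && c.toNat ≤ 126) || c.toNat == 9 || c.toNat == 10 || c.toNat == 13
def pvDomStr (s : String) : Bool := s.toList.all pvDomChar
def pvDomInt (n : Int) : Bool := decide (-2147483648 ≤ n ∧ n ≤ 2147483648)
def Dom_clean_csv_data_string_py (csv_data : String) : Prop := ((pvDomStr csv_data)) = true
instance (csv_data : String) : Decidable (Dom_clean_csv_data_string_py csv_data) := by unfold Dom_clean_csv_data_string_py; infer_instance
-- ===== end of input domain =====

-- B replaces A's fix-lines / re-join-everything / re-split pipeline by a single pass over the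
-- lines that emits each record's row as soon as its id-bearing line arrives (objective: simpler).

-- ===== PORT A =====
-- the loop body: digit-ending branch vs continuation branch; none = the IndexError of the colon split
def pvFixLineA (line : List Char) : Option (List Char) :=
  match PySem.List.pyGet? line (-1) with
  | none => none
  | some c =>
    if PySem.Chars.isdigit c then
      let parts := PySem.Chars.splitOn line [',']
      match PySem.List.pyGet? parts (-1) with
      | none => none
      | some lastf =>
        match PySem.List.pyGet? (PySem.Chars.splitOn lastf [':']) 1 with
        | none => none
        | some tid =>
          some (PySem.Chars.join [','] (PySem.List.slice parts none (some (-1)) ++ [tid]) ++ ['\n'])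
    else some (line ++ [','])

def clean_csv_data_string_py (csv_data : String) : List (List String) :=
  let ls := PySem.List.slice (PySem.Chars.splitOn csv_data.toList ['\n']) (some 1) none
  let ls := ls.filter (fun l => !l.isEmpty)
  let fixed := ls.map pvFixLineA
  if fixed.all Option.isSome then
    let joined := PySem.Chars.join [] (fixed.map (fun o => o.getD []))
    let segs := PySem.Chars.splitOn joined ['\n']
    let rows := segs.map (fun seg => PySem.Chars.splitOn seg [','])
    (rows.filter (fun r => r.length > 1)).map (fun r => r.map String.mk)
  else []

-- ===== PORT B =====
-- single pass: rows emitted so far, comma-terminated text prefix of the current record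
def pvBLoop (rows : List (List (List Char))) (pre : List Char) :
    List (List Char) → Option (List (List (List Char)) × List Char)
  | [] => some (rows, pre)
  | line :: rest =>
    match PySem.List.pyGet? line (-1) with
    | none => none
    | some c =>
      if PySem.Chars.isdigit c then
        let fields := PySem.Chars.splitOn line [',']
        match PySem.List.pyGet? fields (-1) with
        | none => none
        | some lastf =>
          match PySem.List.pyGet? (PySem.Chars.splitOn lastf [':']) 1 with
          | none => none
          | some tid =>
            pvBLoop (rows ++ [PySem.Chars.splitOn
              (pre ++ PySem.Chars.join [','] (fields.dropLast ++ [tid])) [',']]) [] rest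
      else pvBLoop rows (pre ++ line ++ [',']) rest

def clean_csv_data_string_py_alt (csv_data : String) : List (List String) :=
  let ls := (PySem.Chars.splitOn csv_data.toList ['\n']).drop 1
  let ls := ls.filter (fun l => !l.isEmpty)
  match pvBLoop [] [] ls with
  | none => []
  | some (rows, pre) =>
    (((rows ++ [PySem.Chars.splitOn pre [',']]).filter
        (fun (r : List (List Char)) => r.length > 1)).map
      (fun (r : List (List Char)) => r.map String.mk))

-- ===== PRECONDITION & SPEC =====
-- Pre_ excludes exactly the inputs on which A raises IndexError (both A and B raise there):
-- a kept line ending in a digit whose last comma-field contains no colon.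
def Pre_clean_csv_data_string_py (csv_data : String) : Prop :=
  ∀ line ∈ (PySem.Chars.splitOn csv_data.toList ['\n']).drop 1,
    line ≠ [] → PySem.Chars.isdigit (line.getLastD ' ') = true →
      ':' ∈ ((PySem.Chars.splitOn line [',']).getLastD [])
instance (csv_data : String) : Decidable (Pre_clean_csv_data_string_py csv_data) := by
  unfold Pre_clean_csv_data_string_py; infer_instance

def pvWitness_clean_csv_data_string_py : String := "h\na,id:1\nb"

def Spec_clean_csv_data_string_py (csv_data : String) (out : List (List String)) : Prop := out = clean_csv_data_string_py_alt csv_data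
instance (csv_data : String) (out : List (List String)) : Decidable (Spec_clean_csv_data_string_py csv_data out) := by unfold Spec_clean_csv_data_string_py; infer_instance

-- ===== CLAIM (what is proved, stated in full; the proofs are below) =====
def Claim_equal_clean_csv_data_string_py : Prop := ∀ (csv_data : String), Dom_clean_csv_data_string_py csv_data → Pre_clean_csv_data_string_py csv_data → Spec_clean_csv_data_string_py csv_data (clean_csv_data_string_py csv_data)

-- ===== LEMMAS AND PROOFS =====

-- a simple structural recursion equal (proved below) to PySem.Chars.splitOn with a one-char separator
def pvSplitC (c : Char) : List Char → List (List Char)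
  | [] => [[]]
  | x :: xs =>
      if x = c then [] :: pvSplitC c xs
      else
        match pvSplitC c xs with
        | [] => [[x]]
        | r :: rs => (x :: r) :: rs

theorem pvSplitC_ne_nil (c : Char) (s : List Char) : pvSplitC c s ≠ [] := by
  induction s with
  | nil => simp [pvSplitC]
  | cons x xs ih =>
    simp only [pvSplitC]
    split <;> simp
    split <;> simp

theorem pv_go_eq (c : Char) (l : List Char) : ∀ (fuel : Nat) (cur : List Char) (acc : List (List Char)),
    l.length ≤ fuel →
    PySem.Chars.splitOn.go [c] fuel l cur acc
      = acc.reverse ++ (match pvSplitC c l with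
          | [] => []
          | r :: rs => (cur.reverse ++ r) :: rs) := by
  induction l with
  | nil =>
    intro fuel cur acc h
    cases fuel <;> simp [PySem.Chars.splitOn.go, pvSplitC]
  | cons x xs ih =>
    intro fuel cur acc h
    cases fuel with
    | zero => simp at h
    | succ n =>
      by_cases hx : x = c
      · subst hx
        have hpre : [x].isPrefixOf (x :: xs) = true := by simp [List.isPrefixOf]
        simp only [PySem.Chars.splitOn.go, hpre, if_pos]
        rw [show List.drop [x].length (x :: xs) = xs by simp]
        rw [ih n [] (cur.reverse :: acc) (by simpa using Nat.lt_succ_iff.mp (by simpa using h))]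
        rcases hxs : pvSplitC x xs with _ | ⟨r, rs⟩
        · exact absurd hxs (pvSplitC_ne_nil x xs)
        · simp [pvSplitC, hxs]
      · have hpre : [c].isPrefixOf (x :: xs) = false := by
          simp [List.isPrefixOf]
          intro h'; exact absurd h'.symm hx
        simp only [PySem.Chars.splitOn.go, hpre]
        rw [if_neg (by simp)]
        rw [ih n (x :: cur) acc (by simpa using Nat.lt_succ_iff.mp (by simpa using h))]
        rcases hxs : pvSplitC c xs with _ | ⟨r, rs⟩
        · exact absurd hxs (pvSplitC_ne_nil c xs)
        · simp [pvSplitC, hxs, hx]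

theorem pv_splitOn_eq (s : List Char) (c : Char) : PySem.Chars.splitOn s [c] = pvSplitC c s := by
  rw [PySem.Chars.splitOn, pv_go_eq c s (s.length+1) [] [] (by omega)]
  rcases hs : pvSplitC c s with _ | ⟨r, rs⟩
  · exact absurd hs (pvSplitC_ne_nil c s)
  · simp

-- basic pvSplitC facts
theorem pvSplitC_not_mem {c : Char} {s : List Char} (hc : c ∉ s) : pvSplitC c s = [s] := by
  induction s with
  | nil => rfl
  | cons x xs ih =>
    simp only [List.mem_cons, not_or] at hc
    simp [pvSplitC, if_neg (fun h : _ = c => hc.1 h.symm), ih hc.2]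

theorem pvSplitC_append_cons {c : Char} {pre : List Char} (suf : List Char) (hc : c ∉ pre) :
    pvSplitC c (pre ++ c :: suf) = pre :: pvSplitC c suf := by
  induction pre with
  | nil => simp [pvSplitC]
  | cons x xs ih =>
    simp only [List.mem_cons, not_or] at hc
    have h2 := ih hc.2
    simp only [List.cons_append, pvSplitC, h2]
    rw [if_neg (fun h : _ = c => hc.1 h.symm)]

theorem pvSplitC_mem_not_mem {c : Char} {s r : List Char} (hr : r ∈ pvSplitC c s) : c ∉ r := by
  induction s generalizing r with
  | nil => simp [pvSplitC] at hr; simp [hr]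
  | cons x xs ih =>
    simp only [pvSplitC] at hr
    split at hr
    · rcases List.mem_cons.mp hr with h | h
      · simp [h]
      · exact ih h
    · rcases hxs : pvSplitC c xs with _ | ⟨q, qs⟩
      · exact absurd hxs (pvSplitC_ne_nil _ xs)
      · rw [hxs] at hr
        rcases List.mem_cons.mp hr with h | h
        · subst h
          rename_i hne
          intro hmem
          rcases List.mem_cons.mp hmem with h | h
          · exact hne h.symm
          · exact ih (by simp [hxs]) h
        · exact ih (by simp [hxs, h])

theorem pvSplitC_mem_subset {c : Char} {s r : List Char} (hr : r ∈ pvSplitC c s) : ∀ d ∈ r, d ∈ s := by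
  induction s generalizing r with
  | nil => simp [pvSplitC] at hr; simp [hr]
  | cons x xs ih =>
    simp only [pvSplitC] at hr
    split at hr
    · rcases List.mem_cons.mp hr with h | h
      · simp [h]
      · intro d hd; exact List.mem_cons_of_mem _ (ih h d hd)
    · rcases hxs : pvSplitC c xs with _ | ⟨q, qs⟩
      · exact absurd hxs (pvSplitC_ne_nil _ xs)
      · rw [hxs] at hr
        rcases List.mem_cons.mp hr with h | h
        · subst h
          intro d hd
          rcases List.mem_cons.mp hd with h | h
          · simp [h]
          · exact List.mem_cons_of_mem _ (ih (by simp [hxs]) d h)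
        · intro d hd; exact List.mem_cons_of_mem _ (ih (by simp [hxs, h]) d hd)

theorem pvSplitC_length (c : Char) (s : List Char) : (pvSplitC c s).length = s.count c + 1 := by
  induction s with
  | nil => simp [pvSplitC]
  | cons x xs ih =>
    simp only [pvSplitC]
    by_cases hx : x = c
    · simp [hx, ih, List.count_cons]
    · rcases hxs : pvSplitC c xs with _ | ⟨q, qs⟩
      · exact absurd hxs (pvSplitC_ne_nil c xs)
      · rw [hxs] at ih
        simp_all [List.count_cons, hx]

theorem pv_join_nil_eq_flatten (ps : List (List Char)) : PySem.Chars.join [] ps = ps.flatten := by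
  induction ps with
  | nil => simp [PySem.Chars.join_nil]
  | cons p rest ih =>
    cases rest with
    | nil => simp [PySem.Chars.join_singleton]
    | cons q r => rw [PySem.Chars.join_cons_cons]; simp_all

theorem pv_not_mem_join {d c : Char} (hdc : d ≠ c) {ps : List (List Char)}
    (h : ∀ p ∈ ps, d ∉ p) : d ∉ PySem.Chars.join [c] ps := by
  induction ps with
  | nil => simp [PySem.Chars.join_nil]
  | cons p rest ih =>
    cases rest with
    | nil => rw [PySem.Chars.join_singleton]; exact h p (by simp)
    | cons q r =>
      rw [PySem.Chars.join_cons_cons]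
      simp only [List.mem_append, not_or]
      exact ⟨⟨h p (by simp), by simpa using hdc⟩, ih (fun x hx => h x (by simp [hx]))⟩

theorem pv_slice_dropLast {α : Type} (xs : List α) : PySem.List.slice xs none (some (-1)) = xs.dropLast := by
  simp [PySem.List.slice, List.dropLast_eq_take]

theorem pv_slice_drop1 {α : Type} (xs : List α) : PySem.List.slice xs (some 1) none = xs.drop 1 := by
  cases xs <;> simp [PySem.List.slice]

theorem pv_getLast?_getLastD {α : Type} (l : List α) (d : α) (h : l ≠ []) :
    l.getLast? = some (l.getLastD d) := by
  rcases h' : l.getLast? with _ | c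
  · rw [List.getLast?_eq_none_iff] at h'; exact absurd h' h
  · rw [List.getLastD_eq_getLast?, h']; rfl

theorem pvBLoop_append (ls : List (List Char)) : ∀ (rows : List (List (List Char))) (pre : List Char),
    pvBLoop rows pre ls = (pvBLoop [] pre ls).map (fun p => (rows ++ p.1, p.2)) := by
  induction ls with
  | nil => intro rows pre; simp [pvBLoop]
  | cons line rest ih =>
    intro rows pre
    simp only [pvBLoop]
    cases PySem.List.pyGet? line (-1) with
    | none => simp
    | some c =>
      by_cases hd : PySem.Chars.isdigit c
      · simp only [hd, if_pos]
        rcases h2 : PySem.List.pyGet? (PySem.Chars.splitOn line [',']) (-1) with _ | lastf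
        · simp
        · rcases h3 : PySem.List.pyGet? (PySem.Chars.splitOn lastf [':']) 1 with _ | tid
          · simp [h3]
          · simp only [h3]
            rw [ih (rows ++ [PySem.Chars.splitOn
                  (pre ++ PySem.Chars.join [','] ((PySem.Chars.splitOn line [',']).dropLast ++ [tid])) [',']]) [],
                ih ([] ++ [PySem.Chars.splitOn
                  (pre ++ PySem.Chars.join [','] ((PySem.Chars.splitOn line [',']).dropLast ++ [tid])) [',']]) []]
            cases pvBLoop [] [] rest <;> simp
      · simp only [hd, if_neg, Bool.false_eq_true, not_false_eq_true]
        exact ih rows (pre ++ line ++ [','])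

-- main invariant: A's join/resplit pipeline on the remaining lines, prefixed with the current
-- record's accumulated text, equals B's loop
theorem pv_main (ls : List (List Char)) : ∀ (pre : List Char),
    (∀ line ∈ ls, line ≠ []) →
    (∀ line ∈ ls, '\n' ∉ line) →
    (∀ line ∈ ls, PySem.Chars.isdigit (line.getLastD ' ') = true →
      ':' ∈ ((pvSplitC ',' line).getLastD [])) →
    '\n' ∉ pre →
    (∀ line ∈ ls, (pvFixLineA line).isSome) ∧
    ∃ rows' pre', pvBLoop [] pre ls = some (rows', pre') ∧
      (pvSplitC '\n' (pre ++ (ls.map (fun l => (pvFixLineA l).getD [])).flatten)).map (pvSplitC ',')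
        = rows' ++ [pvSplitC ',' pre'] := by
  induction ls with
  | nil =>
    intro pre _ _ _ hpre
    refine ⟨by simp, [], pre, by simp [pvBLoop], ?_⟩
    simp [pvSplitC_not_mem hpre]
  | cons line rest ih =>
    intro pre h1 h2 h3 hpre
    have hne : line ≠ [] := h1 line (by simp)
    have hnl : '\n' ∉ line := h2 line (by simp)
    have hgl : PySem.List.pyGet? line (-1) = some (line.getLastD ' ') := by
      rw [PySem.List.pyGet?_neg_one]; exact pv_getLast?_getLastD line ' ' hne
    have hfne : pvSplitC ',' line ≠ [] := pvSplitC_ne_nil ',' line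
    have hfnl : ∀ f ∈ pvSplitC ',' line, '\n' ∉ f := fun f hf hmem =>
      hnl (pvSplitC_mem_subset hf '\n' hmem)
    have h1' : ∀ l ∈ rest, l ≠ [] := fun l hl => h1 l (by simp [hl])
    have h2' : ∀ l ∈ rest, '\n' ∉ l := fun l hl => h2 l (by simp [hl])
    have h3' : ∀ l ∈ rest, PySem.Chars.isdigit (l.getLastD ' ') = true →
        ':' ∈ ((pvSplitC ',' l).getLastD []) := fun l hl => h3 l (by simp [hl])
    by_cases hd : PySem.Chars.isdigit (line.getLastD ' ') = true
    · -- digit-ending line: a row is completed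
      have hlastf : PySem.List.pyGet? (pvSplitC ',' line) (-1)
          = some ((pvSplitC ',' line).getLastD []) := by
        rw [PySem.List.pyGet?_neg_one]; exact pv_getLast?_getLastD _ _ hfne
      set lastf := (pvSplitC ',' line).getLastD [] with hlastf_def
      have hlastf_mem : lastf ∈ pvSplitC ',' line := by
        rw [hlastf_def, List.getLastD_eq_getLast?]
        rcases h' : (pvSplitC ',' line).getLast? with _ | x
        · rw [List.getLast?_eq_none_iff] at h'; exact absurd h' hfne
        · simpa using List.mem_of_getLast? h'
      have hcolon : ':' ∈ lastf := h3 line (by simp) hd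
      have hlen : 1 < (pvSplitC ':' lastf).length := by
        rw [pvSplitC_length]
        have := List.count_pos_iff.mpr hcolon
        omega
      have htid : PySem.List.pyGet? (pvSplitC ':' lastf) 1
          = some ((pvSplitC ':' lastf)[1]) := by
        have := PySem.List.pyGet?_ofNat (pvSplitC ':' lastf) 1 hlen
        simpa using this
      set tid := (pvSplitC ':' lastf)[1] with htid_def
      have htid_mem : tid ∈ pvSplitC ':' lastf := List.getElem_mem hlen
      have htid_nl : '\n' ∉ tid := fun hm =>
        hnl (pvSplitC_mem_subset hlastf_mem '\n' (pvSplitC_mem_subset htid_mem '\n' hm))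
      have hjoin_nl : '\n' ∉ PySem.Chars.join [','] ((pvSplitC ',' line).dropLast ++ [tid]) := by
        refine pv_not_mem_join (by decide) ?_
        intro p hp
        rcases List.mem_append.mp hp with h | h
        · exact hfnl p ((List.dropLast_sublist _).subset h)
        · simp at h; subst h; exact htid_nl
      have hfix : pvFixLineA line
          = some (PySem.Chars.join [','] ((pvSplitC ',' line).dropLast ++ [tid]) ++ ['\n']) := by
        simp only [pvFixLineA, hgl, pv_splitOn_eq, hlastf, htid, hd, if_pos, pv_slice_dropLast]
      obtain ⟨hsome', rows', pre', hB, heq⟩ := ih [] h1' h2' h3' (by simp)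
      refine ⟨?_, pvSplitC ','
          (pre ++ PySem.Chars.join [','] ((pvSplitC ',' line).dropLast ++ [tid])) :: rows', pre', ?_, ?_⟩
      · intro l hl
        rcases List.mem_cons.mp hl with h | h
        · rw [h, hfix]; rfl
        · exact hsome' l h
      · simp only [pvBLoop, pv_splitOn_eq, hgl, hd, if_pos, hlastf, htid]
        rw [pvBLoop_append, hB]
        simp [pv_splitOn_eq]
      · rw [List.map_cons, List.flatten_cons, hfix]
        simp only [Option.getD_some]
        rw [show pre ++ ((PySem.Chars.join [','] ((pvSplitC ',' line).dropLast ++ [tid]) ++ ['\n'])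
              ++ (rest.map (fun l => (pvFixLineA l).getD [])).flatten)
            = (pre ++ PySem.Chars.join [','] ((pvSplitC ',' line).dropLast ++ [tid]))
              ++ '\n' :: (rest.map (fun l => (pvFixLineA l).getD [])).flatten by simp]
        rw [pvSplitC_append_cons _ (by
          simp only [List.mem_append, not_or]; exact ⟨hpre, hjoin_nl⟩)]
        rw [List.map_cons]
        have heq' : (pvSplitC '\n' ((rest.map (fun l => (pvFixLineA l).getD [])).flatten)).map (pvSplitC ',')
            = rows' ++ [pvSplitC ',' pre'] := by simpa using heq
        rw [heq']
        simp
    · -- continuation line: its text is appended to the record prefix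
      have hfix : pvFixLineA line = some (line ++ [',']) := by
        simp only [pvFixLineA, hgl, hd, if_neg, Bool.false_eq_true, not_false_eq_true]
      have hpre' : '\n' ∉ pre ++ line ++ [','] := by
        simp only [List.mem_append, not_or]
        exact ⟨⟨hpre, hnl⟩, by decide⟩
      obtain ⟨hsome', rows', pre', hB, heq⟩ := ih (pre ++ line ++ [',']) h1' h2' h3' hpre'
      refine ⟨?_, rows', pre', ?_, ?_⟩
      · intro l hl
        rcases List.mem_cons.mp hl with h | h
        · rw [h, hfix]; rfl
        · exact hsome' l h
      · simp only [pvBLoop, hgl, hd, if_neg, Bool.false_eq_true, not_false_eq_true]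
        exact hB
      · rw [List.map_cons, List.flatten_cons, hfix]
        simp only [Option.getD_some]
        rw [show pre ++ ((line ++ [','])
              ++ (rest.map (fun l => (pvFixLineA l).getD [])).flatten)
            = (pre ++ line ++ [',']) ++ (rest.map (fun l => (pvFixLineA l).getD [])).flatten by simp]
        exact heq

-- ===== VERDICT (by name: the statement is the Claim_ definition above) =====
theorem clean_csv_data_string_py_spec : Claim_equal_clean_csv_data_string_py := by
  intro csv hdom hpre
  unfold Spec_clean_csv_data_string_py clean_csv_data_string_py clean_csv_data_string_py_alt
  simp only [pv_splitOn_eq, pv_slice_drop1]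
  have h1 : ∀ line ∈ ((pvSplitC '\n' csv.toList).drop 1).filter (fun l => !l.isEmpty),
      line ≠ [] := by
    intro l hl
    have := (List.mem_filter.mp hl).2
    simpa using this
  have hmem : ∀ line ∈ ((pvSplitC '\n' csv.toList).drop 1).filter (fun l => !l.isEmpty),
      line ∈ pvSplitC '\n' csv.toList := fun l hl =>
    (List.drop_subset 1 _) (List.mem_filter.mp hl).1
  have h2 : ∀ line ∈ ((pvSplitC '\n' csv.toList).drop 1).filter (fun l => !l.isEmpty),
      '\n' ∉ line := fun l hl => pvSplitC_mem_not_mem (hmem l hl)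
  have h3 : ∀ line ∈ ((pvSplitC '\n' csv.toList).drop 1).filter (fun l => !l.isEmpty),
      PySem.Chars.isdigit (line.getLastD ' ') = true →
      ':' ∈ ((pvSplitC ',' line).getLastD []) := by
    intro l hl hdig
    have := hpre l (by
      rw [pv_splitOn_eq]
      exact (List.mem_filter.mp hl).1) (h1 l hl) hdig
    rwa [pv_splitOn_eq] at this
  obtain ⟨hAll, rows', pre', hB, heq⟩ :=
    pv_main (((pvSplitC '\n' csv.toList).drop 1).filter (fun l => !l.isEmpty)) []
      h1 h2 h3 (by simp)
  have hAll' : (((((pvSplitC '\n' csv.toList).drop 1).filter (fun l => !l.isEmpty)).map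
      pvFixLineA).all Option.isSome) = true := by
    rw [List.all_eq_true]
    intro o ho
    obtain ⟨l, hl, rfl⟩ := List.mem_map.mp ho
    exact hAll l hl
  rw [if_pos hAll', hB, pv_join_nil_eq_flatten]
  have heq' : (pvSplitC '\n'
        (((((pvSplitC '\n' csv.toList).drop 1).filter (fun l => !l.isEmpty)).map
          pvFixLineA).map (fun o => o.getD [])).flatten).map (pvSplitC ',')
      = rows' ++ [pvSplitC ',' pre'] := by
    rw [List.map_map]
    simpa using heq
  rw [heq']
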